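-- pv_equiv track=rewrite | github.com/sgonzalezr94/LeetCodeProblems | HackerRank/hackerland_national_bank.py | sortedRemove
-- ===== SOURCE A (Python) =====
-- def sortedRemove(lst, n):
--     # Binary search approach
--     start = 0
--     end = len(lst) - 1
--     while start <= end:
--         mid = (start + end) // 2
--         if n == lst[mid]:
--             lst.pop(mid)
--             return lst
--         if n > lst[mid]:
--             start = mid + 1
--         else:
--             end = mid - 1
-- ===== SOURCE B (Python) =====
-- def sortedRemove(lst, n):
--     # Linear membership test + list.remove instead of a hand-rolled binary search.
--     if n in lst:
--         lst.remove(n)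
--         return lst
-- ===== Notes on version B (the rewrite author's own statement) =====
-- stated objective: simpler
-- what changed: Replaces the hand-rolled binary-search loop with a linear membership test plus list.remove (removing the first equal element, which in a sorted list yields the same list as popping any matching index).
-- outside the precondition, e.g. on sortedRemove([2, 1], 1): A returns None, B returns [2]; on sortedRemove([1, 0, 0, 1], 1): A returns [1, 0, 0], B returns [0, 0, 1]
import Mathlib
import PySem

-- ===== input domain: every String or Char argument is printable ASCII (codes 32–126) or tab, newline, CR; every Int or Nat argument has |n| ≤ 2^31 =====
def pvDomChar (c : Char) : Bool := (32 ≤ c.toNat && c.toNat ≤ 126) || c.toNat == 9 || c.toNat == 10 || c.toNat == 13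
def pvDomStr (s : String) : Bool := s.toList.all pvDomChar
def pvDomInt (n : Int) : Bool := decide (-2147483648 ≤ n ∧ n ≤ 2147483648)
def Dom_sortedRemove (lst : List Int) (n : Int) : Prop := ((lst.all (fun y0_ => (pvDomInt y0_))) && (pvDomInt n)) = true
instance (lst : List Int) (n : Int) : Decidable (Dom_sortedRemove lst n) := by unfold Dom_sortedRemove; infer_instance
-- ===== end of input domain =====

-- B replaces A's hand-rolled binary search by a linear membership test + list.remove (simpler,
-- not faster). Both A and B mutate the caller's list in place; the equivalence proved here is
-- about the RETURN value only.

-- ===== PORT A =====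
-- while start <= end: bisect; pop the found index. The `none` branch of pyGet? is Python's
-- IndexError, unreachable from sortedRemove's initial bounds.
def sortedRemoveGo (lst : List Int) (n : Int) (start e : Int) : Option (List Int) :=
  if hle : start ≤ e then
    let mid := PySem.Int.floordiv (start + e) 2
    match PySem.List.pyGet? lst mid with
    | none => none
    | some v =>
      if n = v then (PySem.List.pop? lst mid).map (·.2)
      else if n > v then sortedRemoveGo lst n (mid + 1) e
      else sortedRemoveGo lst n start (mid - 1)
  else none
termination_by (e + 1 - start).toNat
decreasing_by
  · have hb := PySem.Int.floordiv_two_mid_bounds hle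
    omega
  · have hb := PySem.Int.floordiv_two_mid_bounds hle
    omega

def sortedRemove (lst : List Int) (n : Int) : Option (List Int) :=
  sortedRemoveGo lst n 0 ((lst.length : Int) - 1)

-- ===== PORT B =====
def sortedRemove_alt (lst : List Int) (n : Int) : Option (List Int) :=
  if n ∈ lst then PySem.List.remove? lst n else none

-- ===== PRECONDITION & SPEC =====
-- Pre_ excludes only unsorted lists that contain n: there A's bisection may miss the element,
-- or pop an occurrence whose removal differs from removing the first one — an accident of the
-- search path on input the function (specified for sorted lists) was never meant for.
def Pre_sortedRemove (lst : List Int) (n : Int) : Prop := lst.Pairwise (· ≤ ·) ∨ n ∉ lst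
instance (lst : List Int) (n : Int) : Decidable (Pre_sortedRemove lst n) := by
  unfold Pre_sortedRemove; infer_instance

def pvWitness_sortedRemove : List Int × Int := ([1, 2, 2, 3], 2)

def Spec_sortedRemove (lst : List Int) (n : Int) (out : Option (List Int)) : Prop := out = sortedRemove_alt lst n
instance (lst : List Int) (n : Int) (out : Option (List Int)) : Decidable (Spec_sortedRemove lst n out) := by unfold Spec_sortedRemove; infer_instance

-- ===== CLAIM (what is proved, stated in full; the proofs are below) =====
def Claim_equal_sortedRemove : Prop := ∀ (lst : List Int) (n : Int), Dom_sortedRemove lst n → Pre_sortedRemove lst n → Spec_sortedRemove lst n (sortedRemove lst n)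

-- ===== LEMMAS AND PROOFS =====

-- In a sorted list whose elements are all ≥ n, consing n back after erasing an index holding n
-- restores the list.
lemma cons_eraseIdx_of_run (n : Int) : ∀ (t : List Int) (j : Nat),
    t.Pairwise (· ≤ ·) → (∀ x ∈ t, n ≤ x) → (hj : j < t.length) → t[j] = n →
    n :: t.eraseIdx j = t := by
  intro t
  induction t with
  | nil => intro j _ _ hj; simp at hj
  | cons b s ih =>
    intro j hp hge hj hv
    have hpb := List.pairwise_cons.mp hp
    cases j with
    | zero =>
      simp only [List.getElem_cons_zero] at hv
      simp [List.eraseIdx, hv]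
    | succ j =>
      have hj' : j < s.length := by simpa using hj
      have hsv : s[j] = n := by simpa using hv
      have hb1 : b ≤ n := by
        have := hpb.1 s[j] (List.getElem_mem _)
        rwa [hsv] at this
      have hb2 : n ≤ b := hge b (by simp)
      have hbn : b = n := le_antisymm hb1 hb2
      have hrec := ih j hpb.2 (fun x hx => hge x (by simp [hx])) hj' hsv
      rw [List.eraseIdx_cons_succ]
      subst hbn
      rw [show (b :: b :: s.eraseIdx j = b :: s) ↔ (b :: s.eraseIdx j = s) by simp]
      exact hrec

-- Popping ANY index holding n from a sorted list equals erasing the FIRST occurrence of n.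
lemma eraseIdx_eq_erase (n : Int) : ∀ (l : List Int) (i : Nat),
    l.Pairwise (· ≤ ·) → (hi : i < l.length) → l[i] = n →
    l.eraseIdx i = l.erase n := by
  intro l
  induction l with
  | nil => intro i _ hi; simp at hi
  | cons a t ih =>
    intro i hp hi hv
    have hpt := List.pairwise_cons.mp hp
    by_cases ha : a = n
    · have herase : (a :: t).erase n = t := by simp [ha]
      rw [herase]
      cases i with
      | zero => simp [List.eraseIdx]
      | succ i =>
        have hi' : i < t.length := by simpa using hi
        have htv : t[i] = n := by simpa using hv
        have hge : ∀ x ∈ t, n ≤ x := fun x hx => ha ▸ hpt.1 x hx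
        rw [List.eraseIdx_cons_succ, ha]
        exact cons_eraseIdx_of_run n t i hpt.2 hge hi' htv
    · cases i with
      | zero =>
        simp only [List.getElem_cons_zero] at hv
        exact absurd hv ha
      | succ i =>
        have hi' : i < t.length := by simpa using hi
        have htv : t[i] = n := by simpa using hv
        rw [List.eraseIdx_cons_succ, List.erase_cons_tail (by simpa using ha),
            ih i hpt.2 hi' htv]

-- If n is not in the list at all, A's loop can never hit its pop branch and returns none.
lemma go_none (lst : List Int) (n : Int) (hn : n ∉ lst) :
    ∀ (k : Nat) (start e : Int), (e + 1 - start).toNat ≤ k →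
    sortedRemoveGo lst n start e = none := by
  intro k
  induction k with
  | zero =>
    intro start e hk
    rw [sortedRemoveGo, dif_neg (by omega)]
  | succ k ih =>
    intro start e hk
    by_cases hle : start ≤ e
    · have hb := PySem.Int.floordiv_two_mid_bounds hle
      set mid := PySem.Int.floordiv (start + e) 2 with hmid
      clear_value mid
      rw [sortedRemoveGo, dif_pos hle]
      simp only [← hmid]
      cases hg : PySem.List.pyGet? lst mid with
      | none => rfl
      | some v =>
        have hv : v ∈ lst := by apply PySem.List.mem_of_pyGet?_eq_some; exact hg
        have hne : ¬ n = v := fun h => hn (h ▸ hv)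
        simp only [if_neg hne]
        by_cases hgt : n > v
        · rw [if_pos hgt]; exact ih _ e (by omega)
        · rw [if_neg hgt]; exact ih start _ (by omega)
    · rw [sortedRemoveGo, dif_neg hle]

-- Loop invariant for A's binary search: as long as every index holding n lies inside the
-- current window, the loop computes B's result.
lemma go_eq (lst : List Int) (n : Int) (hs : lst.Pairwise (· ≤ ·)) :
    ∀ (k : Nat) (start e : Int), (e + 1 - start).toNat ≤ k → 0 ≤ start → e < (lst.length : Int) →
    (∀ i : Nat, (hi : i < lst.length) → lst[i] = n → start ≤ (i : Int) ∧ (i : Int) ≤ e) →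
    sortedRemoveGo lst n start e = (if n ∈ lst then PySem.List.remove? lst n else none) := by
  intro k
  induction k with
  | zero =>
    intro start e hk h0 he hocc
    have hgt : ¬ start ≤ e := by omega
    rw [sortedRemoveGo, dif_neg hgt]
    have hnot : n ∉ lst := by
      intro hmem
      obtain ⟨i, hi, hv⟩ := List.mem_iff_getElem.mp hmem
      have := hocc i hi hv
      omega
    rw [if_neg hnot]
  | succ k ih =>
    intro start e hk h0 he hocc
    by_cases hle : start ≤ e
    · have hb := PySem.Int.floordiv_two_mid_bounds hle
      set mid := PySem.Int.floordiv (start + e) 2 with hmid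
      clear_value mid
      have hm0 : 0 ≤ mid := by omega
      have hml : mid < (lst.length : Int) := by omega
      have hmt : mid.toNat < lst.length := by omega
      have hget : PySem.List.pyGet? lst mid = some lst[mid.toNat] :=
        PySem.List.pyGet?_eq_some_getElem lst hm0 hml
      rw [sortedRemoveGo, dif_pos hle]
      simp only [← hmid, hget]
      by_cases heq : n = lst[mid.toNat]
      · rw [if_pos heq]
        have hcast : mid = ((mid.toNat : Nat) : Int) := by omega
        rw [hcast, PySem.List.pop?_natCast lst mid.toNat hmt]
        have hmem : n ∈ lst := heq ▸ List.getElem_mem hmt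
        rw [if_pos hmem, PySem.List.remove?_eq_some_erase lst n hmem, Option.map_some]
        exact congrArg some (eraseIdx_eq_erase n lst mid.toNat hs hmt heq.symm)
      · rw [if_neg heq]
        have hmono := List.pairwise_iff_getElem.mp hs
        by_cases hgt : n > lst[mid.toNat]
        · rw [if_pos hgt]
          refine ih (mid + 1) e (by omega) (by omega) he ?_
          intro i hi hv
          have hie := hocc i hi hv
          refine ⟨?_, hie.2⟩
          by_contra hlt
          have hne : i ≠ mid.toNat := by
            intro hEq; subst hEq; rw [hv] at hgt; exact lt_irrefl n hgt
          have hi' : i < mid.toNat := by omega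
          have := hmono i mid.toNat hi hmt hi'
          rw [hv] at this
          omega
        · rw [if_neg hgt]
          refine ih start (mid - 1) (by omega) h0 (by omega) ?_
          intro i hi hv
          have hie := hocc i hi hv
          refine ⟨hie.1, ?_⟩
          by_contra hlt
          have hne : i ≠ mid.toNat := by
            intro hEq; subst hEq; exact heq hv.symm
          have hi' : mid.toNat < i := by omega
          have := hmono mid.toNat i hmt hi hi'
          rw [hv] at this
          omega
    · rw [sortedRemoveGo, dif_neg hle]
      have hnot : n ∉ lst := by
        intro hmem
        obtain ⟨i, hi, hv⟩ := List.mem_iff_getElem.mp hmem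
        have := hocc i hi hv
        omega
      rw [if_neg hnot]

-- ===== VERDICT (by name: the statement is the Claim_ definition above) =====
theorem sortedRemove_spec : Claim_equal_sortedRemove := by
  intro lst n _ hpre
  unfold Spec_sortedRemove sortedRemove sortedRemove_alt
  by_cases hn : n ∈ lst
  · have hs : lst.Pairwise (· ≤ ·) := hpre.resolve_right (fun h => h hn)
    exact go_eq lst n hs (lst.length) 0 ((lst.length : Int) - 1)
      (by omega) le_rfl (by omega)
      (fun i hi _ => by constructor <;> omega)
  · rw [go_none lst n hn (lst.length) 0 ((lst.length : Int) - 1) (by omega), if_neg hn]
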